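-- pv_equiv track=rewrite | github.com/dem27va/Dp-P026 | Homework 2020-07-21/HW_2020-07-21_Task1.py | calculateRectIntersectArea
-- ===== SOURCE A (Python) =====
-- def calculateRectIntersectArea(rectCoordSetsList):
--     intersections = []
--     intersectionsArea = 0
--
--     for i in range(len(rectCoordSetsList)):             #Получаем координаты точек пересечений, поочередно проверяя пересечения множеств
--         for j in range(i + 1, len(rectCoordSetsList)):
--             if rectCoordSetsList[i] & rectCoordSetsList[j]:
--                 intersections.append(rectCoordSetsList[i] & rectCoordSetsList[j])
--
--     for intersection in intersections:                  #Перебираем пересечения в массиве пересечений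
--         xs = []                                         #Создаем временный массив со всеми координатами X для текущего пересечения
--         ys= []                                          #Создаем временный массив со всеми координатами Y для текущего пересечения
--         for coordPare in intersection:                  #Перебираем пары координат каждой точки текущего пересечения
--             xs.append(coordPare[0])                     #Заполняем массив координат X текущего пересечения
--             ys.append(coordPare[1])                     #Заполняем массив координат Y текущего пересечения
--
--         intersectionsArea += (max(xs) - min(xs)) * (max(ys) - min(ys))
--
--     return intersectionsArea
-- ===== SOURCE B (Python) =====
-- def calculateRectIntersectArea(rectCoordSetsList):
--     # Inverted index: point -> ordered list of indices of the sets containing it.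
--     occ = {}
--     for idx, pts in enumerate(rectCoordSetsList):
--         for p in pts:
--             occ[p] = occ.get(p, []) + [idx]
--     # One pass over the distinct points: grow a bounding box per pair of sets sharing the point.
--     boxes = {}
--     for (x, y), idxs in occ.items():
--         for a in range(len(idxs)):
--             for b in range(a + 1, len(idxs)):
--                 key = (idxs[a], idxs[b])
--                 lx, hx, ly, hy = boxes.get(key, (x, x, y, y))
--                 boxes[key] = (min(lx, x), max(hx, x), min(ly, y), max(hy, y))
--     return sum((hx - lx) * (hy - ly) for lx, hx, ly, hy in boxes.values())
-- ===== Notes on version B (the rewrite author's own statement) =====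
-- stated objective: alternative
-- what changed: Instead of intersecting every pair of sets and re-scanning each intersection for min/max, B builds an inverted index point->list of containing set indices in one pass, then for every distinct point widens a per-pair bounding box stored in a dict keyed by (i,j), and finally sums the box areas; no pairwise set intersection or intersections list is ever built.
import Mathlib
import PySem

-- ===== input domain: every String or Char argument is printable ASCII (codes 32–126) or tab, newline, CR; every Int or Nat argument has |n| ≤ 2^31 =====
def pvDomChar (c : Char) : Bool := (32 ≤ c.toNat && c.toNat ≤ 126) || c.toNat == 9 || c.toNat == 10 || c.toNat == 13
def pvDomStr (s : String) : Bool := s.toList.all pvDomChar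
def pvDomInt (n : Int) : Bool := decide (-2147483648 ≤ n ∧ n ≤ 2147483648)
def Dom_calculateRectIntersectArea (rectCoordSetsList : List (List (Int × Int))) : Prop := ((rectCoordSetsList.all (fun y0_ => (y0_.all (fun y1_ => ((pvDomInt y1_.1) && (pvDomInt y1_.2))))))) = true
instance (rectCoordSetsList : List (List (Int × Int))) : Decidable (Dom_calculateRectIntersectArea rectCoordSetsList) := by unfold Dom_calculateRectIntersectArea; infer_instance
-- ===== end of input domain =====

-- B replaces A's pairwise set intersections with an inverted index (point -> containing
-- set indices) and a per-pair bounding-box dict grown in one pass over the distinct points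
-- (alternative algorithm, same exact result).

-- ===== PORT A =====
-- body of A's inner coordinate loop: xs.append(p[0]); ys.append(p[1])
def pvAppendXY (s : List Int × List Int) (p : Int × Int) : List Int × List Int :=
  (s.1 ++ [p.1], s.2 ++ [p.2])

def calculateRectIntersectArea (rectCoordSetsList : List (List (Int × Int))) : Int :=
  let n : Int := (rectCoordSetsList.length : Int)
  let intersections : List (List (Int × Int)) :=
    (PySem.List.pyRange 0 n 1).foldl (fun acc i =>
      (PySem.List.pyRange (i + 1) n 1).foldl (fun acc j =>
        if PySem.Set.inter (PySem.List.pyGetD rectCoordSetsList i []) (PySem.List.pyGetD rectCoordSetsList j []) ≠ [] then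
          acc ++ [PySem.Set.inter (PySem.List.pyGetD rectCoordSetsList i []) (PySem.List.pyGetD rectCoordSetsList j [])]
        else acc) acc) []
  intersections.foldl (fun area inter =>
    let xy := inter.foldl pvAppendXY ([], [])
    area + ((PySem.List.max? xy.1 (fun v => v)).getD 0 - (PySem.List.min? xy.1 (fun v => v)).getD 0)
         * ((PySem.List.max? xy.2 (fun v => v)).getD 0 - (PySem.List.min? xy.2 (fun v => v)).getD 0)) 0

-- ===== PORT B =====
-- the seed box of a single point, and widening a box by a point (Source B's min/max line)
def pvSeed (p : Int × Int) : Int × Int × Int × Int := (p.1, p.1, p.2, p.2)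
def pvWiden (b : Int × Int × Int × Int) (p : Int × Int) : Int × Int × Int × Int :=
  (min b.1 p.1, max b.2.1 p.1, min b.2.2.1 p.2, max b.2.2.2 p.2)
-- area of a bounding box (lx, hx, ly, hy)
def pvArea (b : Int × Int × Int × Int) : Int := (b.2.1 - b.1) * (b.2.2.2 - b.2.2.1)

def calculateRectIntersectArea_alt (rectCoordSetsList : List (List (Int × Int))) : Int :=
  let occ : PySem.Dict (Int × Int) (List Int) :=
    (PySem.List.enumerate rectCoordSetsList 0).foldl (fun d ei =>
      ei.2.foldl (fun d p => d.insert p (d.getD p [] ++ [ei.1])) d) PySem.Dict.empty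
  let boxes : PySem.Dict (Int × Int) (Int × Int × Int × Int) :=
    occ.items.foldl (fun bx it =>
      (PySem.List.pyRange 0 (PySem.List.len it.2) 1).foldl (fun bx a =>
        (PySem.List.pyRange (a + 1) (PySem.List.len it.2) 1).foldl (fun bx b =>
          bx.insert (PySem.List.pyGetD it.2 a 0, PySem.List.pyGetD it.2 b 0)
            (pvWiden (bx.getD (PySem.List.pyGetD it.2 a 0, PySem.List.pyGetD it.2 b 0) (pvSeed it.1)) it.1)) bx) bx)
      PySem.Dict.empty
  (boxes.values.map pvArea).sum

-- ===== PRECONDITION & SPEC =====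
-- Pre_: the inner lists are images of Python SETS (the set-to-list convention), so each holds
-- distinct points; no input the Python A accepts is excluded (a Python set cannot hold duplicates).
def Pre_calculateRectIntersectArea (rectCoordSetsList : List (List (Int × Int))) : Prop :=
  ∀ s ∈ rectCoordSetsList, s.Nodup
instance (rectCoordSetsList : List (List (Int × Int))) : Decidable (Pre_calculateRectIntersectArea rectCoordSetsList) := by
  unfold Pre_calculateRectIntersectArea; infer_instance

def pvWitness_calculateRectIntersectArea : (List (List (Int × Int))) :=
  [[(0, 0), (2, 3)], [(0, 0), (1, 5)]]

def Spec_calculateRectIntersectArea (rectCoordSetsList : List (List (Int × Int))) (out : Int) : Prop := out = calculateRectIntersectArea_alt rectCoordSetsList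
instance (rectCoordSetsList : List (List (Int × Int))) (out : Int) : Decidable (Spec_calculateRectIntersectArea rectCoordSetsList out) := by unfold Spec_calculateRectIntersectArea; infer_instance

-- ===== CLAIM (what is proved, stated in full; the proofs are below) =====
def Claim_equal_calculateRectIntersectArea : Prop := ∀ (rectCoordSetsList : List (List (Int × Int))), Dom_calculateRectIntersectArea rectCoordSetsList → Pre_calculateRectIntersectArea rectCoordSetsList → Spec_calculateRectIntersectArea rectCoordSetsList (calculateRectIntersectArea rectCoordSetsList)

-- ===== LEMMAS AND PROOFS =====

-- ---- all i<j position pairs of a list, in A's lexicographic scan order ----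
def pvPairList {γ : Type} : List γ → List (γ × γ)
  | [] => []
  | x :: t => (t.map (fun y => (x, y))) ++ pvPairList t

-- ---- the nested range / range(a+1, n) loop over xs[a] is a fold over pvPairList (enumerate xs) ----
lemma pvInnerEnum {β σ : Type} (d : β) :
    ∀ (xs pre : List β) (f : σ → Int × β → σ) (init : σ),
      (PySem.List.pyRange (pre.length : Int) ((pre.length + xs.length : Nat) : Int) 1).foldl
        (fun s b => f s (b, PySem.List.pyGetD (pre ++ xs) b d)) init
      = (PySem.List.enumerate xs (pre.length : Int)).foldl f init := by
  intro xs
  induction xs with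
  | nil =>
      intro pre f init
      rw [PySem.List.pyRange_one_eq_nil (by push_cast [List.length_nil]; omega)]
      rfl
  | cons x t ih =>
      intro pre f init
      rw [PySem.List.pyRange_one_cons (by push_cast [List.length_cons]; omega)]
      rw [PySem.List.enumerate_cons]
      simp only [List.foldl_cons]
      have hx : PySem.List.pyGetD (pre ++ x :: t) (pre.length : Int) d = x := by
        simp [PySem.List.pyGetD_natCast, List.getD_eq_getElem?_getD]
      rw [hx]
      have := ih (pre ++ [x]) f (f init ((pre.length : Int), x))
      simp only [List.length_append, List.length_cons, List.length_nil, Nat.zero_add,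
        List.append_assoc, List.singleton_append] at this ⊢
      rw [show ((pre.length : Int) + 1) = ((pre.length + 1 : Nat) : Int) by push_cast; ring]
      rw [show (pre.length + (t.length + 1)) = (pre.length + 1 + t.length) by omega] at *
      exact this

lemma pvNestedEnum {β σ : Type} (d : β) :
    ∀ (xs pre : List β) (f : σ → (Int × β) → (Int × β) → σ) (init : σ),
      (PySem.List.pyRange (pre.length : Int) ((pre.length + xs.length : Nat) : Int) 1).foldl
        (fun s a =>
          (PySem.List.pyRange (a + 1) ((pre.length + xs.length : Nat) : Int) 1).foldl
            (fun s b => f s (a, PySem.List.pyGetD (pre ++ xs) a d) (b, PySem.List.pyGetD (pre ++ xs) b d)) s) init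
      = (pvPairList (PySem.List.enumerate xs (pre.length : Int))).foldl (fun s q => f s q.1 q.2) init := by
  intro xs
  induction xs with
  | nil =>
      intro pre f init
      rw [PySem.List.pyRange_one_eq_nil (by push_cast [List.length_nil]; omega)]
      rfl
  | cons x t ih =>
      intro pre f init
      rw [PySem.List.pyRange_one_cons (by push_cast [List.length_cons]; omega)]
      rw [PySem.List.enumerate_cons]
      simp only [List.foldl_cons, pvPairList, List.foldl_append, List.foldl_map]
      have hx : PySem.List.pyGetD (pre ++ x :: t) (pre.length : Int) d = x := by
        simp [PySem.List.pyGetD_natCast, List.getD_eq_getElem?_getD]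
      rw [hx]
      have hinner := pvInnerEnum d t (pre ++ [x])
        (fun s q => f s ((pre.length : Int), x) q) init
      simp only [List.length_append, List.length_cons, List.length_nil, Nat.zero_add,
        List.append_assoc, List.singleton_append] at hinner ⊢
      rw [show ((pre.length : Int) + 1) = ((pre.length + 1 : Nat) : Int) by push_cast; ring]
      rw [show (pre.length + (t.length + 1)) = (pre.length + 1 + t.length) by omega] at *
      rw [hinner]
      have := ih (pre ++ [x]) f
        ((PySem.List.enumerate t ((pre.length + 1 : Nat) : Int)).foldl
          (fun s q => f s ((pre.length : Int), x) q) init)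
      simp only [List.length_append, List.length_cons, List.length_nil, Nat.zero_add,
        List.append_assoc, List.singleton_append] at this
      exact this

-- ---- generic characterisation of a dict built by an insert-update loop ----
lemma pvDictFoldGet {κ ν τ : Type} [BEq κ] [LawfulBEq κ] [DecidableEq κ]
    (key : τ → κ) (F : τ → ν → ν) (d0 : τ → ν) :
    ∀ (l : List τ) (d : PySem.Dict κ ν) (k : κ),
      (l.foldl (fun d t => d.insert (key t) (F t (d.getD (key t) (d0 t)))) d).get? k
      = (l.filter (fun t => key t == k)).foldl (fun o t => some (F t (o.getD (d0 t)))) (d.get? k) := by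
  intro l
  induction l with
  | nil => intro d k; rfl
  | cons t r ih =>
      intro d k
      simp only [List.foldl_cons, List.filter_cons]
      by_cases h : key t = k
      · subst h
        simp only [BEq.rfl, ih]
        rw [PySem.Dict.get?_insert]
        simp [PySem.Dict.getD_eq_get?_getD]
      · have hb : (key t == k) = false := by simp [h]
        rw [hb]
        simp only [Bool.false_eq_true, if_false, ih]
        rw [PySem.Dict.get?_insert]
        simp [Ne.symm h]

-- ---- small generic list facts used by both characterisations ----
lemma pvAppFold_some {τ : Type} (g : τ → Int) :
    ∀ (l : List τ) (ys : List Int),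
      l.foldl (fun o t => some ((o.getD []) ++ [g t])) (some ys) = some (ys ++ l.map g) := by
  intro l
  induction l with
  | nil => intro ys; simp
  | cons t r ih => intro ys; simp [ih]

lemma pvAppFold_none {τ : Type} (g : τ → Int) (l : List τ) :
    l.foldl (fun o t => some ((o.getD []) ++ [g t])) none
      = if l = [] then none else some (l.map g) := by
  cases l with
  | nil => rfl
  | cons t r => simp [List.foldl_cons, pvAppFold_some]

lemma pvFilterEqNodup {α : Type} [BEq α] [LawfulBEq α] (p : α) :
    ∀ (l : List α), l.Nodup → l.filter (fun x => x == p) = if p ∈ l then [p] else [] := by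
  intro l
  induction l with
  | nil => intro _; rfl
  | cons x t ih =>
      intro h
      rcases List.nodup_cons.mp h with ⟨hx, ht⟩
      by_cases hxp : x = p
      · subst hxp
        simp [ih ht, hx]
      · simp only [List.filter_cons, beq_iff_eq, hxp, if_false, List.mem_cons, ih ht]
        simp [Ne.symm hxp]

lemma pvFlatMapIfP {γ δ : Type} (c : γ → Prop) [DecidablePred c] (g : γ → δ) :
    ∀ (l : List γ),
      l.flatMap (fun a => if c a then [g a] else []) = (l.filter (fun a => decide (c a))).map g := by
  intro l
  induction l with
  | nil => rfl
  | cons x t ih =>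
      by_cases h : c x <;> simp [h, ih]

lemma pvFoldlAppendIte {α β : Type} (c : α → Prop) [DecidablePred c] (f : α → β) :
    ∀ (l : List α) (acc : List β),
      l.foldl (fun acc x => if c x then acc ++ [f x] else acc) acc
      = acc ++ ((l.filter (fun x => decide (c x))).map f) := by
  intro l
  induction l with
  | nil => intro acc; simp
  | cons x t ih =>
      intro acc
      by_cases h : c x <;> simp [h, ih]

-- ---- proof-layer mirrors of B's two dicts ----
def pvOcc (L : List (List (Int × Int))) : PySem.Dict (Int × Int) (List Int) :=
  (PySem.List.enumerate L 0).foldl (fun d ei =>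
    ei.2.foldl (fun d p => d.insert p (d.getD p [] ++ [ei.1])) d) PySem.Dict.empty

def pvPlL (L : List (List (Int × Int))) : List ((Int × Int) × Int) :=
  (PySem.List.enumerate L 0).flatMap (fun ei => ei.2.map (fun p => (p, ei.1)))

def pvIdxs (L : List (List (Int × Int))) (p : Int × Int) : List Int :=
  ((PySem.List.enumerate L 0).filter (fun ei => decide (p ∈ ei.2))).map (·.1)

def pvBoxes (L : List (List (Int × Int))) : PySem.Dict (Int × Int) (Int × Int × Int × Int) :=
  (pvOcc L).items.foldl (fun bx it =>
    (PySem.List.pyRange 0 (PySem.List.len it.2) 1).foldl (fun bx a =>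
      (PySem.List.pyRange (a + 1) (PySem.List.len it.2) 1).foldl (fun bx b =>
        bx.insert (PySem.List.pyGetD it.2 a 0, PySem.List.pyGetD it.2 b 0)
          (pvWiden (bx.getD (PySem.List.pyGetD it.2 a 0, PySem.List.pyGetD it.2 b 0) (pvSeed it.1)) it.1)) bx) bx)
    PySem.Dict.empty

def pvT (L : List (List (Int × Int))) : List ((Int × Int) × (Int × Int)) :=
  (pvOcc L).items.flatMap (fun it => (pvPairList it.2).map (fun k => (k, it.1)))

def pvPts (L : List (List (Int × Int))) (k : Int × Int) : List (Int × Int) :=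
  ((pvT L).filter (fun t => t.1 == k)).map (·.2)

def pvBStep (o : Option (Int × Int × Int × Int)) (p : Int × Int) : Option (Int × Int × Int × Int) :=
  some (pvWiden (o.getD (pvSeed p)) p)

def pvBFold (l : List (Int × Int)) : Option (Int × Int × Int × Int) := l.foldl pvBStep none

-- A's area term of one intersection list
def pvTermA (inter : List (Int × Int)) : Int :=
  let xy := inter.foldl pvAppendXY ([], [])
  ((PySem.List.max? xy.1 (fun v => v)).getD 0 - (PySem.List.min? xy.1 (fun v => v)).getD 0)
    * ((PySem.List.max? xy.2 (fun v => v)).getD 0 - (PySem.List.min? xy.2 (fun v => v)).getD 0)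

lemma pvAlt_eq (L : List (List (Int × Int))) :
    calculateRectIntersectArea_alt L = ((pvBoxes L).values.map pvArea).sum := rfl

-- ---- occ characterisation ----
lemma pvOcc_eq_flat (L : List (List (Int × Int))) :
    pvOcc L = (pvPlL L).foldl (fun d t => d.insert t.1 (d.getD t.1 [] ++ [t.2])) PySem.Dict.empty := by
  unfold pvOcc pvPlL
  rw [List.foldl_flatMap]
  congr 1
  funext d ei
  rw [List.foldl_map]

lemma pvOcc_get? (L : List (List (Int × Int))) (p : Int × Int) :
    (pvOcc L).get? p =
      (if (pvPlL L).filter (fun t => t.1 == p) = [] then none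
       else some (((pvPlL L).filter (fun t => t.1 == p)).map (·.2))) := by
  rw [pvOcc_eq_flat]
  have h := pvDictFoldGet (fun t : (Int × Int) × Int => t.1)
    (fun t ys => ys ++ [t.2]) (fun _ => []) (pvPlL L) PySem.Dict.empty p
  simp only [PySem.Dict.get?_empty] at h
  rw [h, pvAppFold_none (fun t : (Int × Int) × Int => t.2)]

lemma pvOcc_getD (L : List (List (Int × Int))) (p : Int × Int) :
    (pvOcc L).getD p [] = ((pvPlL L).filter (fun t => t.1 == p)).map (·.2) := by
  rw [PySem.Dict.getD_eq_get?_getD, pvOcc_get?]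
  split_ifs with h
  · simp [h]
  · simp

lemma pvFilterFlat (p : Int × Int) :
    ∀ (E : List (Int × List (Int × Int))), (∀ ei ∈ E, ei.2.Nodup) →
      ((E.flatMap (fun ei => ei.2.map (fun q => (q, ei.1)))).filter (fun t => t.1 == p)).map (·.2)
      = (E.filter (fun ei => decide (p ∈ ei.2))).map (·.1) := by
  intro E
  induction E with
  | nil => intro _; rfl
  | cons x r ih =>
      intro h
      have hx := h x (by simp)
      have hr := ih (fun ei hei => h ei (by simp [hei]))
      simp only [List.flatMap_cons, List.filter_append, List.map_append, hr, List.filter_cons]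
      have hhead : ((x.2.map (fun q => (q, x.1))).filter (fun t => t.1 == p)).map
          (fun t : (Int × Int) × Int => t.2) = if p ∈ x.2 then [x.1] else [] := by
        rw [List.filter_map]
        have : ((fun t : (Int × Int) × Int => t.1 == p) ∘ (fun q => (q, x.1)))
            = (fun q => q == p) := rfl
        rw [this, pvFilterEqNodup p x.2 hx]
        by_cases hp : p ∈ x.2 <;> simp [hp]
      rw [hhead]
      by_cases hp : p ∈ x.2 <;> simp [hp]

lemma pvOcc_getD_idxs (L : List (List (Int × Int))) (hnd : ∀ s ∈ L, s.Nodup) (p : Int × Int) :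
    (pvOcc L).getD p [] = pvIdxs L p := by
  rw [pvOcc_getD]
  refine pvFilterFlat p (PySem.List.enumerate L 0) ?_
  intro ei hei
  rcases (PySem.List.mem_enumerate_iff L 0 ei).mp hei with ⟨k, hk, rfl⟩
  exact hnd L[k] (List.getElem_mem hk)

lemma pvIdxs_pairwise (L : List (List (Int × Int))) (p : Int × Int) :
    (pvIdxs L p).Pairwise (· < ·) := by
  unfold pvIdxs
  rw [List.pairwise_map]
  exact (PySem.List.pairwise_lt_enumerate L 0).filter _

lemma mem_pvIdxs (L : List (List (Int × Int))) (p : Int × Int) (i : Int) :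
    i ∈ pvIdxs L p ↔ ∃ (k : Nat) (_ : k < L.length), i = (k : Int) ∧ p ∈ L[k] := by
  simp only [pvIdxs, List.mem_map, List.mem_filter, PySem.List.mem_enumerate_iff,
    decide_eq_true_eq]
  constructor
  · rintro ⟨x, ⟨⟨k, hk, rfl⟩, hpx⟩, rfl⟩
    exact ⟨k, hk, by simp, by simpa using hpx⟩
  · rintro ⟨k, hk, rfl, hp⟩
    exact ⟨(0 + (k : Int), L[k]), ⟨⟨k, hk, rfl⟩, by simpa⟩, by simp⟩

lemma pvOcc_keys (L : List (List (Int × Int))) :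
    (pvOcc L).keys = PySem.Set.ofList ((pvPlL L).map (·.1)) := by
  rw [pvOcc_eq_flat]
  have h := PySem.Dict.keys_foldl_insert_key (pvPlL L) (fun t : (Int × Int) × Int => t.1)
    (fun d t => d.getD t.1 [] ++ [t.2]) PySem.Dict.empty
  simpa [PySem.Dict.keys_empty, PySem.Set.update_nil_left] using h

lemma pvOcc_keys_nodup (L : List (List (Int × Int))) : (pvOcc L).keys.Nodup := by
  rw [pvOcc_eq_flat]
  exact PySem.Dict.nodup_keys_foldl_insert_key (pvPlL L) (fun t : (Int × Int) × Int => t.1)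
    (fun d t => d.getD t.1 [] ++ [t.2]) PySem.Dict.empty (by simp [PySem.Dict.keys_empty])

lemma mem_pvOcc_keys (L : List (List (Int × Int))) (p : Int × Int) :
    p ∈ (pvOcc L).keys ↔ ∃ (k : Nat) (_ : k < L.length), p ∈ L[k] := by
  rw [pvOcc_keys, PySem.Set.mem_ofList]
  simp only [pvPlL, List.mem_map, List.mem_flatMap, PySem.List.mem_enumerate_iff]
  constructor
  · rintro ⟨a, ⟨a1, ⟨k, hk, rfl⟩, ⟨q, hq, rfl⟩⟩, rfl⟩
    exact ⟨k, hk, hq⟩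
  · rintro ⟨k, hk, hp⟩
    exact ⟨(p, 0 + (k : Int)), ⟨(0 + (k : Int), L[k]), ⟨k, hk, rfl⟩, ⟨p, hp, rfl⟩⟩, rfl⟩

-- ---- pvPairList facts ----
lemma mem_pvPairList {γ : Type} (m : γ → Int) :
    ∀ (l : List γ), l.Pairwise (fun a b => m a < m b) →
      ∀ q : γ × γ, (q ∈ pvPairList l ↔ q.1 ∈ l ∧ q.2 ∈ l ∧ m q.1 < m q.2) := by
  intro l
  induction l with
  | nil => intro _ q; simp [pvPairList]
  | cons x t ih =>
      intro h q
      rcases List.pairwise_cons.mp h with ⟨hx, ht⟩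
      simp only [pvPairList, List.mem_append, List.mem_map, ih ht, List.mem_cons]
      constructor
      · rintro (⟨y, hy, rfl⟩ | ⟨h1, h2, hlt⟩)
        · exact ⟨Or.inl rfl, Or.inr hy, hx y hy⟩
        · exact ⟨Or.inr h1, Or.inr h2, hlt⟩
      · rintro ⟨h1 | h1, h2 | h2, hlt⟩
        · exact absurd hlt (by simp [h1, h2])
        · exact Or.inl ⟨q.2, h2, by rw [← h1]⟩
        · exact absurd (hx q.1 h1) (by rw [h2] at hlt; omega)
        · exact Or.inr ⟨h1, h2, hlt⟩

lemma nodup_pvPairList {γ : Type} (m : γ → Int) :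
    ∀ (l : List γ), l.Pairwise (fun a b => m a < m b) → (pvPairList l).Nodup := by
  intro l
  induction l with
  | nil => intro _; simp [pvPairList]
  | cons x t ih =>
      intro h
      rcases List.pairwise_cons.mp h with ⟨hx, ht⟩
      have htn : t.Nodup := ht.imp (fun {a b} hab => fun e => by subst e; omega)
      refine List.nodup_append.mpr ⟨htn.map ?_, ih ht, ?_⟩
      · intro a b he; exact congrArg Prod.snd he
      · intro q hq
        rcases List.mem_map.mp hq with ⟨y, hy, rfl⟩
        intro b hb he
        rw [← he] at hb
        have hm := ((mem_pvPairList m t ht) (x, y)).mp hb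
        have hxx : m x < m x := hx x hm.1
        omega

lemma pvPairList_map {γ δ : Type} (g : γ → δ) :
    ∀ (l : List γ), pvPairList (l.map g) = (pvPairList l).map (fun q => (g q.1, g q.2)) := by
  intro l
  induction l with
  | nil => rfl
  | cons x t ih => simp [pvPairList, ih, List.map_map, Function.comp]

-- ---- boxes characterisation ----
lemma pvBoxes_eq_flat (L : List (List (Int × Int))) :
    pvBoxes L = (pvT L).foldl
      (fun bx t => bx.insert t.1 (pvWiden (bx.getD t.1 (pvSeed t.2)) t.2)) PySem.Dict.empty := by
  unfold pvBoxes pvT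
  rw [List.foldl_flatMap]
  congr 1
  funext bx it
  rw [List.foldl_map]
  have hn := pvNestedEnum (0 : Int) it.2 [] (fun s q1 q2 =>
    s.insert (q1.2, q2.2) (pvWiden (s.getD (q1.2, q2.2) (pvSeed it.1)) it.1)) bx
  simp only [List.length_nil, Nat.zero_add, List.nil_append, Nat.cast_zero] at hn
  rw [PySem.List.len_eq, hn]
  conv_rhs => rw [← PySem.List.map_snd_enumerate it.2 0]
  rw [pvPairList_map, List.foldl_map]

lemma pvBoxes_get? (L : List (List (Int × Int))) (k : Int × Int) :
    (pvBoxes L).get? k = pvBFold (pvPts L k) := by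
  rw [pvBoxes_eq_flat]
  have h := pvDictFoldGet (fun t : (Int × Int) × (Int × Int) => t.1)
    (fun t v => pvWiden v t.2) (fun t => pvSeed t.2) (pvT L) PySem.Dict.empty k
  simp only [PySem.Dict.get?_empty] at h
  rw [h]
  unfold pvPts pvBFold
  rw [List.foldl_map]
  rfl

lemma pvBoxes_keys (L : List (List (Int × Int))) :
    (pvBoxes L).keys = PySem.Set.ofList ((pvT L).map (·.1)) := by
  rw [pvBoxes_eq_flat]
  have h := PySem.Dict.keys_foldl_insert_key (pvT L) (fun t : (Int × Int) × (Int × Int) => t.1)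
    (fun bx t => pvWiden (bx.getD t.1 (pvSeed t.2)) t.2) PySem.Dict.empty
  simpa [PySem.Dict.keys_empty, PySem.Set.update_nil_left] using h

lemma pvBoxes_keys_nodup (L : List (List (Int × Int))) : (pvBoxes L).keys.Nodup := by
  rw [pvBoxes_eq_flat]
  exact PySem.Dict.nodup_keys_foldl_insert_key (pvT L) (fun t : (Int × Int) × (Int × Int) => t.1)
    (fun bx t => pvWiden (bx.getD t.1 (pvSeed t.2)) t.2) PySem.Dict.empty
    (by simp [PySem.Dict.keys_empty])

lemma mem_pvBoxes_keys (L : List (List (Int × Int))) (k : Int × Int) :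
    k ∈ (pvBoxes L).keys ↔ ∃ x, x ∈ pvPts L k := by
  rw [pvBoxes_keys, PySem.Set.mem_ofList]
  unfold pvPts
  constructor
  · intro hk
    rcases List.mem_map.mp hk with ⟨t, ht, rfl⟩
    exact ⟨t.2, List.mem_map.mpr ⟨t, List.mem_filter.mpr ⟨ht, by simp⟩, rfl⟩⟩
  · rintro ⟨x, hx⟩
    rcases List.mem_map.mp hx with ⟨t, ht, rfl⟩
    rcases List.mem_filter.mp ht with ⟨htT, he⟩
    exact List.mem_map.mpr ⟨t, htT, by simpa using he⟩

-- ---- pts characterisation ----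
lemma pvPts_eq_filter (L : List (List (Int × Int))) (hnd : ∀ s ∈ L, s.Nodup) (k : Int × Int) :
    pvPts L k = (pvOcc L).keys.filter (fun p => decide (k ∈ pvPairList (pvIdxs L p))) := by
  unfold pvPts pvT
  rw [PySem.Dict.items_eq_map_keys (pvOcc L) (pvOcc_keys_nodup L) []]
  rw [List.flatMap_map]
  simp only [pvOcc_getD_idxs L hnd]
  rw [List.filter_flatMap, List.map_flatMap]
  have hper : (fun p => (((pvPairList (pvIdxs L p)).map (fun k' => (k', p))).filter
        (fun t => t.1 == k)).map (fun t : (Int × Int) × (Int × Int) => t.2))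
      = fun p => if k ∈ pvPairList (pvIdxs L p) then [p] else [] := by
    funext p
    rw [List.filter_map]
    have hc : ((fun t : (Int × Int) × (Int × Int) => t.1 == k) ∘ (fun k' => (k', p)))
        = (fun k' => k' == k) := rfl
    rw [hc, pvFilterEqNodup k _ (nodup_pvPairList (fun i => i) _ (pvIdxs_pairwise L p))]
    by_cases hk : k ∈ pvPairList (pvIdxs L p) <;> simp [hk]
  rw [hper]
  rw [pvFlatMapIfP (fun p => k ∈ pvPairList (pvIdxs L p)) (fun p => p), List.map_id']

lemma mem_pvPts (L : List (List (Int × Int))) (hnd : ∀ s ∈ L, s.Nodup) (k : Int × Int) (p : Int × Int) :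
    p ∈ pvPts L k ↔ k.1 ∈ pvIdxs L p ∧ k.2 ∈ pvIdxs L p ∧ k.1 < k.2 := by
  rw [pvPts_eq_filter L hnd k, List.mem_filter]
  simp only [decide_eq_true_eq]
  rw [mem_pvPairList (fun i => i) _ (pvIdxs_pairwise L p) k]
  constructor
  · rintro ⟨_, h⟩; exact h
  · intro h
    refine ⟨?_, h⟩
    rcases (mem_pvIdxs L p k.1).mp h.1 with ⟨a, ha, _, hp⟩
    exact (mem_pvOcc_keys L p).mpr ⟨a, ha, hp⟩

lemma nodup_pvPts (L : List (List (Int × Int))) (hnd : ∀ s ∈ L, s.Nodup) (k : Int × Int) :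
    (pvPts L k).Nodup := by
  rw [pvPts_eq_filter L hnd k]
  exact (pvOcc_keys_nodup L).filter _

-- ---- bounding-box fold facts ----
lemma pvBStep_rcomm : ∀ (o : Option (Int × Int × Int × Int)) (p q : Int × Int),
    pvBStep (pvBStep o p) q = pvBStep (pvBStep o q) p := by
  intro o p q
  cases o <;> simp [pvBStep, pvWiden, pvSeed, Prod.ext_iff] <;> omega

lemma pvBFold_perm {l l' : List (Int × Int)} (h : l.Perm l') : pvBFold l = pvBFold l' := by
  unfold pvBFold
  exact @List.Perm.foldl_eq _ _ pvBStep _ _ ⟨pvBStep_rcomm⟩ h none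

lemma pvBFold_some : ∀ (t : List (Int × Int)) (b : Int × Int × Int × Int),
    t.foldl pvBStep (some b) = some (t.foldl pvWiden b) := by
  intro t
  induction t with
  | nil => intro b; rfl
  | cons p r ih => intro b; simp [pvBStep, ih]

lemma pvWiden_foldl : ∀ (t : List (Int × Int)) (b : Int × Int × Int × Int),
    t.foldl pvWiden b =
      (t.foldl (fun a p => min a p.1) b.1, t.foldl (fun a p => max a p.1) b.2.1,
       t.foldl (fun a p => min a p.2) b.2.2.1, t.foldl (fun a p => max a p.2) b.2.2.2) := by
  intro t
  induction t with
  | nil => intro b; rfl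
  | cons p r ih => intro b; simp [pvWiden, ih]

lemma pvAppendXY_foldl : ∀ (l : List (Int × Int)) (xs ys : List Int),
    l.foldl pvAppendXY (xs, ys) = (xs ++ l.map Prod.fst, ys ++ l.map Prod.snd) := by
  intro l
  induction l with
  | nil => intro xs ys; simp
  | cons p r ih => intro xs ys; simp [pvAppendXY, ih]

lemma pvTermA_eq_area (h : Int × Int) (t : List (Int × Int)) :
    pvTermA (h :: t) = pvArea ((pvBFold (h :: t)).getD (0, 0, 0, 0)) := by
  unfold pvTermA pvArea pvBFold
  rw [pvAppendXY_foldl (h :: t) [] []]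
  simp only [List.nil_append, List.map_cons]
  rw [PySem.List.max?_id_cons, PySem.List.min?_id_cons, PySem.List.max?_id_cons,
    PySem.List.min?_id_cons]
  simp only [Option.getD_some]
  rw [List.foldl_cons]
  have h1 : pvBStep none h = some (pvSeed h) := by
    simp [pvBStep, pvWiden, pvSeed]
  rw [h1, pvBFold_some, pvWiden_foldl]
  simp only [Option.getD_some, pvSeed]
  rw [List.foldl_map, List.foldl_map, List.foldl_map, List.foldl_map]

-- ---- A as a sum over the filtered pair list ----
lemma pvA_eq_sum (L : List (List (Int × Int))) :
    calculateRectIntersectArea L =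
      (((pvPairList (PySem.List.enumerate L 0)).filter
          (fun q => decide (PySem.Set.inter q.1.2 q.2.2 ≠ []))).map
        (fun q => pvTermA (PySem.Set.inter q.1.2 q.2.2))).sum := by
  simp only [calculateRectIntersectArea]
  have hn := pvNestedEnum ([] : List (Int × Int)) L []
    (fun (acc : List (List (Int × Int))) q1 q2 =>
      if PySem.Set.inter q1.2 q2.2 ≠ [] then acc ++ [PySem.Set.inter q1.2 q2.2] else acc)
    ([] : List (List (Int × Int)))
  simp only [List.length_nil, Nat.zero_add, List.nil_append, Nat.cast_zero] at hn
  rw [hn]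
  have hb : (fun (area : Int) (inter : List (Int × Int)) =>
      let xy := inter.foldl pvAppendXY ([], [])
      area + ((PySem.List.max? xy.1 (fun v => v)).getD 0 - (PySem.List.min? xy.1 (fun v => v)).getD 0)
           * ((PySem.List.max? xy.2 (fun v => v)).getD 0 - (PySem.List.min? xy.2 (fun v => v)).getD 0))
      = fun area inter => area + pvTermA inter := rfl
  rw [hb, PySem.List.foldl_add]
  rw [pvFoldlAppendIte (fun q : (Int × List (Int × Int)) × (Int × List (Int × Int)) =>
    PySem.Set.inter q.1.2 q.2.2 ≠ []) (fun q => PySem.Set.inter q.1.2 q.2.2)]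
  simp only [List.map_map, List.nil_append, Int.zero_add]
  rfl

-- the pair-to-key map and the per-key area term used to align the two sums
def pvPhi (q : (Int × List (Int × Int)) × (Int × List (Int × Int))) : Int × Int := (q.1.1, q.2.1)

def pvG (L : List (List (Int × Int))) (k : Int × Int) : Int :=
  pvArea ((pvBoxes L).getD k (0, 0, 0, 0))

-- the cross-over fact: the common points of sets a and b are exactly pvPts at key (a, b)
lemma pvPts_perm_inter (L : List (List (Int × Int))) (hnd : ∀ s ∈ L, s.Nodup)
    (a b : Nat) (ha : a < L.length) (hb : b < L.length) (hab : a < b) :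
    (pvPts L ((a : Int), (b : Int))).Perm (PySem.Set.inter L[a] L[b]) := by
  refine (List.perm_ext_iff_of_nodup (nodup_pvPts L hnd _)
    (PySem.Set.nodup_inter _ _ (hnd L[a] (List.getElem_mem ha)))).mpr ?_
  intro x
  rw [mem_pvPts L hnd, PySem.Set.mem_inter]
  dsimp only
  constructor
  · rintro ⟨h1, h2, _⟩
    rcases (mem_pvIdxs L x _).mp h1 with ⟨a', ha', e1, hp1⟩
    rcases (mem_pvIdxs L x _).mp h2 with ⟨b', hb', e2, hp2⟩
    have : a = a' := by exact_mod_cast e1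
    have : b = b' := by exact_mod_cast e2
    subst_vars
    exact ⟨hp1, hp2⟩
  · rintro ⟨h1, h2⟩
    exact ⟨(mem_pvIdxs L x _).mpr ⟨a, ha, rfl, h1⟩,
      (mem_pvIdxs L x _).mpr ⟨b, hb, rfl, h2⟩, by exact_mod_cast hab⟩


-- per-pair term equality on members of the filtered pair list
lemma pvTerm_eq_g (L : List (List (Int × Int))) (hnd : ∀ s ∈ L, s.Nodup) :
    ∀ q ∈ (pvPairList (PySem.List.enumerate L 0)).filter
        (fun q => decide (PySem.Set.inter q.1.2 q.2.2 ≠ [])),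
      pvTermA (PySem.Set.inter q.1.2 q.2.2) = pvG L (pvPhi q) := by
  intro q hq
  rcases List.mem_filter.mp hq with ⟨hq1, hne⟩
  rw [decide_eq_true_eq] at hne
  have hm := (mem_pvPairList (fun ei => ei.1) _
    (PySem.List.pairwise_lt_enumerate L 0) q).mp hq1
  rcases (PySem.List.mem_enumerate_iff L 0 q.1).mp hm.1 with ⟨a, ha, e1⟩
  rcases (PySem.List.mem_enumerate_iff L 0 q.2).mp hm.2.1 with ⟨b, hb, e2⟩
  rw [zero_add] at e1 e2
  have hab : a < b := by
    have := hm.2.2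
    rw [e1, e2] at this
    dsimp only at this
    exact_mod_cast this
  rw [e1, e2] at hne ⊢
  have hphi : pvPhi q = ((a : Int), (b : Int)) := by
    unfold pvPhi; rw [e1, e2]
  rw [hphi]
  unfold pvG
  rw [PySem.Dict.getD_eq_get?_getD, pvBoxes_get?,
    pvBFold_perm (pvPts_perm_inter L hnd a b ha hb hab)]
  rcases List.exists_cons_of_ne_nil hne with ⟨h0, t0, hi⟩
  rw [hi, pvTermA_eq_area]

-- the key sets of the two sums coincide (as a permutation of nodup lists)
lemma pvPhi_perm_keys (L : List (List (Int × Int))) (hnd : ∀ s ∈ L, s.Nodup) :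
    (((pvPairList (PySem.List.enumerate L 0)).filter
        (fun q => decide (PySem.Set.inter q.1.2 q.2.2 ≠ []))).map pvPhi).Perm
      (pvBoxes L).keys := by
  have hSA : ((pvPairList (PySem.List.enumerate L 0)).filter
      (fun q => decide (PySem.Set.inter q.1.2 q.2.2 ≠ []))).Nodup :=
    (nodup_pvPairList (fun ei => ei.1) _ (PySem.List.pairwise_lt_enumerate L 0)).filter _
  have henum : ∀ u v : Int × List (Int × Int), u ∈ PySem.List.enumerate L 0 →
      v ∈ PySem.List.enumerate L 0 → u.1 = v.1 → u = v := by
    intro u v hu hv he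
    rcases (PySem.List.mem_enumerate_iff L 0 u).mp hu with ⟨a, ha, rfl⟩
    rcases (PySem.List.mem_enumerate_iff L 0 v).mp hv with ⟨b, hb, rfl⟩
    simp only [zero_add] at he
    have : a = b := by exact_mod_cast he
    subst this
    rfl
  refine (List.perm_ext_iff_of_nodup ?_ (pvBoxes_keys_nodup L)).mpr ?_
  · refine hSA.map_on ?_
    intro q hq q' hq' he
    have hm := (mem_pvPairList (fun ei => ei.1) _
      (PySem.List.pairwise_lt_enumerate L 0) q).mp (List.mem_filter.mp hq).1
    have hm' := (mem_pvPairList (fun ei => ei.1) _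
      (PySem.List.pairwise_lt_enumerate L 0) q').mp (List.mem_filter.mp hq').1
    simp only [pvPhi, Prod.ext_iff] at he
    exact Prod.ext (henum _ _ hm.1 hm'.1 he.1) (henum _ _ hm.2.1 hm'.2.1 he.2)
  · intro k
    rw [mem_pvBoxes_keys]
    constructor
    · intro hk
      rcases List.mem_map.mp hk with ⟨q, hq, rfl⟩
      rcases List.mem_filter.mp hq with ⟨hq1, hne⟩
      rw [decide_eq_true_eq] at hne
      have hm := (mem_pvPairList (fun ei => ei.1) _
        (PySem.List.pairwise_lt_enumerate L 0) q).mp hq1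
      rcases (PySem.List.mem_enumerate_iff L 0 q.1).mp hm.1 with ⟨a, ha, e1⟩
      rcases (PySem.List.mem_enumerate_iff L 0 q.2).mp hm.2.1 with ⟨b, hb, e2⟩
      rw [zero_add] at e1 e2
      rw [e1, e2] at hne
      rcases List.exists_mem_of_ne_nil _ hne with ⟨x, hx⟩
      rw [PySem.Set.mem_inter] at hx
      refine ⟨x, (mem_pvPts L hnd _ x).mpr ?_⟩
      have hphi : pvPhi q = ((a : Int), (b : Int)) := by
        unfold pvPhi; rw [e1, e2]
      rw [hphi]
      have hab : a < b := by
        have := hm.2.2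
        rw [e1, e2] at this
        dsimp only at this
        exact_mod_cast this
      dsimp only
      exact ⟨(mem_pvIdxs L x _).mpr ⟨a, ha, rfl, hx.1⟩,
        (mem_pvIdxs L x _).mpr ⟨b, hb, rfl, hx.2⟩, by exact_mod_cast hab⟩
    · rintro ⟨x, hx⟩
      rcases (mem_pvPts L hnd k x).mp hx with ⟨h1, h2, hlt⟩
      rcases (mem_pvIdxs L x k.1).mp h1 with ⟨a, ha, ea, hp1⟩
      rcases (mem_pvIdxs L x k.2).mp h2 with ⟨b, hb, eb, hp2⟩
      refine List.mem_map.mpr ⟨((((a : Nat) : Int), L[a]), (((b : Nat) : Int), L[b])), ?_, ?_⟩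
      · refine List.mem_filter.mpr ⟨?_, ?_⟩
        · refine (mem_pvPairList (fun ei => ei.1) _
            (PySem.List.pairwise_lt_enumerate L 0) _).mpr ?_
          refine ⟨(PySem.List.mem_enumerate_iff L 0 _).mpr ⟨a, ha, by simp⟩,
            (PySem.List.mem_enumerate_iff L 0 _).mpr ⟨b, hb, by simp⟩, ?_⟩
          show (a : Int) < (b : Int)
          rw [← ea, ← eb]; exact hlt
        · rw [decide_eq_true_eq]
          exact List.ne_nil_of_mem ((PySem.Set.mem_inter L[a] L[b] x).mpr ⟨hp1, hp2⟩)
      · unfold pvPhi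
        simp only
        rw [← ea, ← eb]

-- ===== VERDICT (by name: the statement is the Claim_ definition above) =====
theorem calculateRectIntersectArea_spec : Claim_equal_calculateRectIntersectArea := by
  intro L _ hnd
  show calculateRectIntersectArea L = calculateRectIntersectArea_alt L
  rw [pvA_eq_sum, pvAlt_eq]
  rw [PySem.Dict.values_eq_map_keys (pvBoxes L) (pvBoxes_keys_nodup L) (0, 0, 0, 0)]
  rw [List.map_map]
  rw [List.map_congr_left (pvTerm_eq_g L hnd)]
  have hs := ((pvPhi_perm_keys L hnd).map (pvG L)).sum_eq
  rw [List.map_map] at hs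
  exact hs
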